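-- pv_equiv track=rewrite | github.com/erikhenriksson/register-segmentation | 2aaaa_segment_multiscale_opt.py | combine_short_sentences
-- ===== SOURCE A (Python) =====
-- from typing import List, Tuple, Dict
--
-- def combine_short_sentences(
--
--     sentences: List[str],
--     sent_spans: List[Tuple[int, int]],
--     min_chars: int = 100,
-- ) -> Tuple[List[str], List[Tuple[int, int]]]:
--     """Combine sentences into larger blocks while preserving token spans."""
--     result = []
--     result_spans = []
--     buffer = []
--     buffer_spans = []
--
--     for sentence, span in zip(sentences, sent_spans):
--         if len(sentence) >= min_chars:
--             # If there's a buffer, save it first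
--             if buffer:
--                 combined_buffer = " ".join(buffer)
--                 result.append(combined_buffer)
--                 # Use the start of the first buffered span and end of the last
--                 result_spans.append((buffer_spans[0][0], buffer_spans[-1][1]))
--                 buffer = []
--                 buffer_spans = []
--
--             # Add the current long sentence
--             result.append(sentence)
--             result_spans.append(span)
--         else:
--             buffer.append(sentence)
--             buffer_spans.append(span)
--
--             # Check if buffer is now large enough
--             if len(" ".join(buffer)) >= min_chars:
--                 combined_buffer = " ".join(buffer)
--                 result.append(combined_buffer)
--                 # Use the start of the first buffered span and end of the last
--                 result_spans.append((buffer_spans[0][0], buffer_spans[-1][1]))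
--                 buffer = []
--                 buffer_spans = []
--
--     # Handle any remaining buffer
--     if buffer:
--         combined_buffer = " ".join(buffer)
--         result.append(combined_buffer)
--         result_spans.append((buffer_spans[0][0], buffer_spans[-1][1]))
--
--     # Final pass to ensure no tiny segments remain
--     final_result = []
--     final_spans = []
--     i = 0
--     while i < len(result):
--         if len(result[i]) < min_chars:
--             if i < len(result) - 1:
--                 # Combine with next segment
--                 result[i + 1] = result[i] + " " + result[i + 1]
--                 # Update span to cover both segments
--                 result_spans[i + 1] = (result_spans[i][0], result_spans[i + 1][1])
--                 result.pop(i)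
--                 result_spans.pop(i)
--             elif i > 0:
--                 # Combine with previous segment
--                 result[i - 1] += " " + result[i]
--                 # Update span to cover both segments
--                 result_spans[i - 1] = (result_spans[i - 1][0], result_spans[i][1])
--                 result.pop(i)
--                 result_spans.pop(i)
--             else:
--                 break
--         else:
--             final_result.append(result[i])
--             final_spans.append(result_spans[i])
--             i += 1
--
--     return final_result, final_spans
-- ===== SOURCE B (Python) =====
-- def combine_short_sentences(sentences, sent_spans, min_chars=100):
--     """Combine sentences into larger blocks while preserving token spans.
--
--     Single left-to-right pass carrying a pending (text, start) accumulator with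
--     an incrementally maintained string, instead of A's repeated " ".join over a
--     growing buffer plus a second pop-based fix-up pass.  Like A, a trailing
--     accumulated block shorter than min_chars is not emitted.
--     """
--     out, spans = [], []
--     pend = None  # (accumulated text, span start)
--     for s, (a, b) in zip(sentences, sent_spans):
--         if pend is None:
--             text, start = s, a
--         else:
--             text, start = pend[0] + " " + s, pend[1]
--         if len(text) >= min_chars:
--             out.append(text)
--             spans.append((start, b))
--             pend = None
--         else:
--             pend = (text, start)
--     return out, spans
-- ===== Notes on version B (the rewrite author's own statement) =====
-- stated objective: simpler
-- what changed: B replaces A's two passes (a buffer re-joined with " ".join after every append, then a pop-based fix-up loop over the blocks) by one left-to-right pass that carries a single incrementally-extended pending string and emits it once it reaches min_chars; like A it does not emit a trailing pending block shorter than min_chars.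
import Mathlib
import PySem

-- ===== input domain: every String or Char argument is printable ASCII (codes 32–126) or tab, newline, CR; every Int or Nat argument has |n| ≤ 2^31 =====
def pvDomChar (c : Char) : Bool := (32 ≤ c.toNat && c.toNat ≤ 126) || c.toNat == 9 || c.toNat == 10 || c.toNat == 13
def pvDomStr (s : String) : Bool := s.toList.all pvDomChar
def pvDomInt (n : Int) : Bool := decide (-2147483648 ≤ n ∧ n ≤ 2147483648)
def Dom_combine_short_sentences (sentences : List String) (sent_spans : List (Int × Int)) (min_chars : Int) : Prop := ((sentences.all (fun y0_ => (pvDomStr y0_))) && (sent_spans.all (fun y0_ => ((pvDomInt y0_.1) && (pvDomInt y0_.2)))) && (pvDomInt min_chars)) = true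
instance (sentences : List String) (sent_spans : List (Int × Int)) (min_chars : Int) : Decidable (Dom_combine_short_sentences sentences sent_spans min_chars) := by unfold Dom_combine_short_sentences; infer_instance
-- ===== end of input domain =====

-- B replaces A's repeated " ".join over a growing buffer plus a second pop-based fix-up
-- pass by one pass carrying an incrementally extended pending string (objective: simpler).

-- ===== PORT A =====
-- strings are handled as List Char (PySem.Chars) throughout; String.ofList at the boundary

-- " ".join(buffer)
def pvJoin (bufs : List (List Char)) : List Char := PySem.Chars.join [' '] bufs

-- the flush of A's buffer: result.append(" ".join(buffer)); result_spans.append((buffer_spans[0][0], buffer_spans[-1][1]))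
def pvFlush (res : List (List Char)) (rsp : List (Int × Int)) (buf : List (List Char)) (bsp : List (Int × Int)) :
    List (List Char) × List (Int × Int) :=
  (res ++ [pvJoin buf], rsp ++ [((bsp.headD (0, 0)).1, (bsp.getLastD (0, 0)).2)])

-- one iteration of A's 'for sentence, span in zip(...)' loop; state = (result, result_spans, buffer, buffer_spans)
def pvStepA (m : Int) (st : List (List Char) × List (Int × Int) × List (List Char) × List (Int × Int))
    (x : List Char × (Int × Int)) : List (List Char) × List (Int × Int) × List (List Char) × List (Int × Int) :=
  match st, x with
  | (res, rsp, buf, bsp), (s, sp) =>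
    if m ≤ ((s.length : Int)) then
      if buf = [] then (res ++ [s], rsp ++ [sp], buf, bsp)
      else
        let (res', rsp') := pvFlush res rsp buf bsp
        (res' ++ [s], rsp' ++ [sp], [], [])
    else
      let buf' := buf ++ [s]
      let bsp' := bsp ++ [sp]
      if m ≤ ((pvJoin buf').length : Int) then
        let (res', rsp') := pvFlush res rsp buf' bsp'
        (res', rsp', [], [])
      else (res, rsp, buf', bsp')

-- A's final 'while i < len(result)' pass: a short entry is merged into the next one (pop(i));
-- a short LAST entry is popped after 'result[i-1] +=', whose effect never reaches final_result
-- (the old string was already appended), and a single short entry hits 'break' — both yield nothing.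
def pvFinal (m : Int) : List (List Char) → List (Int × Int) → List (List Char) × List (Int × Int)
  | [], _ => ([], [])
  | r :: rest, sps =>
    match sps with
    | [] => ([], [])
    | sp :: sps' =>
      if ((r.length : Int) < m) then
        match rest, sps' with
        | r2 :: rest', sp2 :: sps'' => pvFinal m ((r ++ ' ' :: r2) :: rest') ((sp.1, sp2.2) :: sps'')
        | _, _ => ([], [])
      else
        (r :: (pvFinal m rest sps').1, sp :: (pvFinal m rest sps').2)
termination_by rs _ => rs.length
decreasing_by all_goals (simp only [List.length_cons]; omega)

def combine_short_sentences (sentences : List String) (sent_spans : List (Int × Int)) (min_chars : Int) :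
    List String × (List (Int × Int)) :=
  match ((sentences.map String.toList).zip sent_spans).foldl (pvStepA min_chars) ([], [], [], []) with
  | (res, rsp, buf, bsp) =>
    let (res', rsp') := if buf = [] then (res, rsp) else pvFlush res rsp buf bsp
    let (fr, fs) := pvFinal min_chars res' rsp'
    (fr.map String.ofList, fs)

-- ===== PORT B =====
-- one iteration of B's loop; state = (out, spans, pend) with pend = (accumulated text, span start)
def pvStepB (m : Int) (st : List (List Char) × List (Int × Int) × Option (List Char × Int))
    (x : List Char × (Int × Int)) : List (List Char) × List (Int × Int) × Option (List Char × Int) :=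
  match st, x with
  | (out, spans, pend), (s, sp) =>
    let (text, start) :=
      match pend with
      | none => (s, sp.1)
      | some (t, st0) => (t ++ ' ' :: s, st0)
    if m ≤ ((text.length : Int)) then (out ++ [text], spans ++ [(start, sp.2)], none)
    else (out, spans, some (text, start))

def combine_short_sentences_alt (sentences : List String) (sent_spans : List (Int × Int)) (min_chars : Int) :
    List String × (List (Int × Int)) :=
  let st := ((sentences.map String.toList).zip sent_spans).foldl (pvStepB min_chars) ([], [], none)
  (st.1.map String.ofList, st.2.1)

-- ===== PRECONDITION & SPEC =====
def Spec_combine_short_sentences (sentences : List String) (sent_spans : List (Int × Int)) (min_chars : Int) (out : List String × (List (Int × Int))) : Prop := out = combine_short_sentences_alt sentences sent_spans min_chars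
instance (sentences : List String) (sent_spans : List (Int × Int)) (min_chars : Int) (out : List String × (List (Int × Int))) : Decidable (Spec_combine_short_sentences sentences sent_spans min_chars out) := by unfold Spec_combine_short_sentences; infer_instance

-- ===== CLAIM (what is proved, stated in full; the proofs are below) =====
def Claim_equal_combine_short_sentences : Prop := ∀ (sentences : List String) (sent_spans : List (Int × Int)) (min_chars : Int), Dom_combine_short_sentences sentences sent_spans min_chars → Spec_combine_short_sentences sentences sent_spans min_chars (combine_short_sentences sentences sent_spans min_chars)

-- ===== LEMMAS AND PROOFS =====

-- a prefix of blocks that pvFinal emits verbatim, independently of what follows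
def pvGood (m : Int) (res : List (List Char)) (rsp : List (Int × Int)) (out : List (List Char)) (spans : List (Int × Int)) : Prop :=
  ∀ more msp, pvFinal m (res ++ more) (rsp ++ msp) =
    (out ++ (pvFinal m more msp).1, spans ++ (pvFinal m more msp).2)

-- the simulation invariant between A's loop state and B's loop state
def pvInv (m : Int) (stA : List (List Char) × List (Int × Int) × List (List Char) × List (Int × Int))
    (stB : List (List Char) × List (Int × Int) × Option (List Char × Int)) : Prop :=
  match stA, stB with
  | (res, rsp, buf, bsp), (out, spans, pend) =>
    pvGood m res rsp out spans ∧
    match pend with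
    | none => buf = [] ∧ bsp = []
    | some (t, a) => buf ≠ [] ∧ bsp ≠ [] ∧ t = pvJoin buf ∧ ((t.length : Int)) < m ∧ a = (bsp.headD (0, 0)).1

lemma pvFinal_nil (m : Int) (sps : List (Int × Int)) : pvFinal m [] sps = ([], []) := by
  rw [pvFinal.eq_def]

lemma pvFinal_long {m : Int} {r : List Char} (h : ¬ ((r.length : Int) < m))
    (rest : List (List Char)) (sp : Int × Int) (sps : List (Int × Int)) :
    pvFinal m (r :: rest) (sp :: sps) =
      (r :: (pvFinal m rest sps).1, sp :: (pvFinal m rest sps).2) := by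
  rw [pvFinal.eq_def]; simp [h]

lemma pvFinal_short_cons {m : Int} {r : List Char} (h : ((r.length : Int) < m))
    (r2 : List Char) (rest : List (List Char)) (sp sp2 : Int × Int) (sps : List (Int × Int)) :
    pvFinal m (r :: r2 :: rest) (sp :: sp2 :: sps) =
      pvFinal m ((r ++ ' ' :: r2) :: rest) ((sp.1, sp2.2) :: sps) := by
  rw [pvFinal.eq_def]; simp [h]

lemma pvFinal_short_single {m : Int} {r : List Char} (h : ((r.length : Int) < m))
    (sp : Int × Int) (sps : List (Int × Int)) :
    pvFinal m [r] (sp :: sps) = ([], []) := by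
  rw [pvFinal.eq_def]; simp [h]

lemma pvGood_nil (m : Int) : pvGood m [] [] [] [] := by
  intro more msp; simp

lemma pvGood_long {m : Int} {res rsp out spans} (h : pvGood m res rsp out spans)
    {x : List Char} (hx : m ≤ ((x.length : Int))) (sp : Int × Int) :
    pvGood m (res ++ [x]) (rsp ++ [sp]) (out ++ [x]) (spans ++ [sp]) := by
  intro more msp
  rw [List.append_assoc, List.append_assoc, h ([x] ++ more) ([sp] ++ msp)]
  have hnot : ¬ ((x.length : Int)) < m := by omega
  simp [pvFinal_long hnot, List.append_assoc]

lemma pvGood_short_long {m : Int} {res rsp out spans} (h : pvGood m res rsp out spans)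
    {t x : List Char} (ht : ((t.length : Int)) < m) (hx : m ≤ ((x.length : Int)))
    (a b : Int) (sp : Int × Int) :
    pvGood m (res ++ [t, x]) (rsp ++ [(a, b), sp]) (out ++ [t ++ ' ' :: x]) (spans ++ [(a, sp.2)]) := by
  intro more msp
  rw [List.append_assoc, List.append_assoc, h ([t, x] ++ more) ([(a, b), sp] ++ msp)]
  have hlen : m ≤ (((t ++ ' ' :: x).length : Int)) := by
    simp at hx ht ⊢; omega
  have hnot : ¬ (((t ++ ' ' :: x).length : Int)) < m := by omega
  simp [pvFinal_short_cons ht, pvFinal_long hnot, List.append_assoc]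

lemma pvJoin_concat {buf : List (List Char)} (h : buf ≠ []) (s : List Char) :
    pvJoin (buf ++ [s]) = pvJoin buf ++ ' ' :: s := by
  induction buf with
  | nil => exact absurd rfl h
  | cons x xs ih =>
    cases xs with
    | nil => simp [pvJoin, PySem.Chars.join_cons_cons, PySem.Chars.join_singleton]
    | cons y ys =>
      have := ih (by simp)
      simp only [pvJoin, List.cons_append, PySem.Chars.join_cons_cons] at this ⊢
      simp [this]

lemma pvStep_inv (m : Int) (stA : List (List Char) × List (Int × Int) × List (List Char) × List (Int × Int))
    (stB : List (List Char) × List (Int × Int) × Option (List Char × Int))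
    (x : List Char × (Int × Int)) (h : pvInv m stA stB) :
    pvInv m (pvStepA m stA x) (pvStepB m stB x) := by
  obtain ⟨res, rsp, buf, bsp⟩ := stA
  obtain ⟨out, spans, pend⟩ := stB
  obtain ⟨s, sp⟩ := x
  obtain ⟨hg, hp⟩ := h
  cases pend with
  | none =>
    obtain ⟨hb, hbs⟩ := hp
    subst hb; subst hbs
    by_cases hlong : m ≤ ((s.length : Int))
    · simp only [pvStepA, pvStepB, hlong, if_true]
      exact ⟨by simpa using pvGood_long hg hlong sp, rfl, rfl⟩
    · have hshort : ((s.length : Int)) < m := by omega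
      have hj : pvJoin [s] = s := PySem.Chars.join_singleton _ _
      simp only [pvStepA, pvStepB, hlong, if_false, List.nil_append, hj]
      exact ⟨hg, by simp, by simp, hj.symm, hshort, rfl⟩
  | some ta =>
    obtain ⟨t, a⟩ := ta
    obtain ⟨hbuf, hbsp, ht, htlen, ha⟩ := hp
    have htext : pvJoin (buf ++ [s]) = t ++ ' ' :: s := by rw [pvJoin_concat hbuf, ht]
    have hhead : ((bsp ++ [sp]).headD (0, 0)).1 = a := by
      cases bsp with
      | nil => exact absurd rfl hbsp
      | cons z zs => simpa using ha.symm
    have hlast : ((bsp ++ [sp]).getLastD (0, 0)).2 = sp.2 := by simp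
    by_cases hlong : m ≤ ((s.length : Int))
    · -- long sentence: A flushes the (short) buffer then appends s; B emits t ++ ' ' :: s
      have htx : m ≤ (((t ++ ' ' :: s).length : Int)) := by
        simp at hlong ⊢; omega
      simp only [pvStepA, pvStepB, pvFlush, hlong, if_true, if_neg hbuf, htx]
      refine ⟨?_, rfl, rfl⟩
      have := pvGood_short_long hg htlen hlong a ((bsp.getLastD (0, 0)).2) sp
      have ha' : a = (bsp.head?.getD (0, 0)).1 := by simpa using ha
      simpa [← ht, ← ha', List.append_assoc] using this
    · -- short sentence: both extend the accumulator; flush iff the joined text got long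
      by_cases hemit : m ≤ (((t ++ ' ' :: s).length : Int))
      · simp only [pvStepA, pvStepB, pvFlush, hlong, if_false, htext, hemit, if_true]
        refine ⟨?_, rfl, rfl⟩
        rw [hhead, hlast]
        exact pvGood_long hg hemit (a, sp.2)
      · simp only [pvStepA, pvStepB, pvFlush, hlong, if_false, htext, hemit]
        exact ⟨hg, by simp, by simp, htext.symm, by omega, hhead.symm⟩

lemma pvFold_inv (m : Int) (items : List (List Char × (Int × Int))) :
    ∀ stA stB, pvInv m stA stB →
      pvInv m (items.foldl (pvStepA m) stA) (items.foldl (pvStepB m) stB) := by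
  induction items with
  | nil => intro stA stB h; exact h
  | cons x xs ih => intro stA stB h; exact ih _ _ (pvStep_inv m stA stB x h)

lemma pvFinish (m : Int) {res rsp buf bsp out spans pend}
    (h : pvInv m (res, rsp, buf, bsp) (out, spans, pend)) :
    (let (res', rsp') := if buf = [] then (res, rsp) else pvFlush res rsp buf bsp
     pvFinal m res' rsp') = (out, spans) := by
  obtain ⟨hg, hp⟩ := h
  cases pend with
  | none =>
    obtain ⟨hb, _⟩ := hp
    subst hb
    have := hg [] []
    simp only [List.append_nil, pvFinal_nil] at this
    simpa using this
  | some ta =>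
    obtain ⟨t, a⟩ := ta
    obtain ⟨hbuf, _, ht, htlen, _⟩ := hp
    have := hg [pvJoin buf] [(((bsp.headD (0, 0)).1, (bsp.getLastD (0, 0)).2))]
    rw [← ht, pvFinal_short_single htlen] at this
    simp only [if_neg hbuf, pvFlush]
    rw [← ht]
    simpa using this

-- ===== VERDICT (by name: the statement is the Claim_ definition above) =====
theorem combine_short_sentences_spec : Claim_equal_combine_short_sentences := by
  intro sentences sent_spans min_chars _
  unfold Spec_combine_short_sentences combine_short_sentences combine_short_sentences_alt
  have hinv := pvFold_inv min_chars ((sentences.map String.toList).zip sent_spans)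
    ([], [], [], []) ([], [], none) ⟨pvGood_nil min_chars, rfl, rfl⟩
  set stA := ((sentences.map String.toList).zip sent_spans).foldl (pvStepA min_chars) ([], [], [], []) with hA
  set stB := ((sentences.map String.toList).zip sent_spans).foldl (pvStepB min_chars) ([], [], none) with hB
  obtain ⟨res, rsp, buf, bsp⟩ := stA
  obtain ⟨out, spans, pend⟩ := stB
  have hfin := pvFinish min_chars hinv
  simp only [] at hfin ⊢
  rw [hfin]
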